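-- pv_equiv track=rewrite | github.com/binhrobles/thirteen | packages/training/analyze_combo_breaks.py | get_run_ranks
-- ===== SOURCE A (Python) =====
-- def get_run_ranks(hand_ranks):
--     """
--     Return set of ranks that are part of a valid run (3+ consecutive).
--     Rank 12 (2s) cannot be in runs. Ranks 0-11 = 3,4,5,6,7,8,9,10,J,Q,K,A
--     """
--     eligible = sorted(set(r for r in hand_ranks if r < 12))
--     in_run = set()
--     # Find all consecutive sequences of length 3+
--     i = 0
--     while i < len(eligible):
--         j = i
--         while j + 1 < len(eligible) and eligible[j + 1] == eligible[j] + 1: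
--             j += 1
--         length = j - i + 1
--         if length >= 3:
--             for k in range(i, j + 1):
--                 in_run.add(eligible[k])
--         i = j + 1
--     return in_run
-- ===== SOURCE B (Python) =====
-- def get_run_ranks(hand_ranks):
--     """Rank r (< 12) is in a 3+ consecutive run iff one of the three windows
--     {r-2,r-1,r}, {r-1,r,r+1}, {r,r+1,r+2} lies entirely in the hand."""
--     p = {r for r in hand_ranks if r < 12}
--     return {r for r in sorted(p)
--             if {r - 2, r - 1} <= p or {r - 1, r + 1} <= p or {r + 1, r + 2} <= p}
-- ===== Notes on version B (the rewrite author's own statement) =====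
-- stated objective: simpler
-- what changed: Replaces the index-based scan for maximal consecutive runs with a local membership test: a rank is in a run iff one of the three consecutive 3-windows covering it lies in the presence set of ranks < 12.
import Mathlib
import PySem

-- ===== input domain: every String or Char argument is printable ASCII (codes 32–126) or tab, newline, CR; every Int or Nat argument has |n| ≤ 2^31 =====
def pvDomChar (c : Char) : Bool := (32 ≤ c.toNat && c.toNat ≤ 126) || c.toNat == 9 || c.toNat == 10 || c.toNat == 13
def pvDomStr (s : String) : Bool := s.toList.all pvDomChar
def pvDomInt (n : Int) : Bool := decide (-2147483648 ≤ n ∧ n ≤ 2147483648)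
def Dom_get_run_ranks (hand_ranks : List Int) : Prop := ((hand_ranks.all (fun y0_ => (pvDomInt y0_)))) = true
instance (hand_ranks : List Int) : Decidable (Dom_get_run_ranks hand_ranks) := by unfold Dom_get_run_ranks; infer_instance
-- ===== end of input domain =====

-- B replaces A's sort-and-scan for maximal consecutive runs by a per-rank test of the
-- three consecutive 3-windows against the presence set (objective: simpler).

-- ===== PORT A =====
-- inner 'while' of A: extend the run while the next element is previous + 1;
-- returns (the extension of the run after x, the remaining elements)
def pvInnerA (x : Int) : List Int → List Int × List Int
  | [] => ([], [])
  | y :: t =>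
    if y = x + 1 then
      let p := pvInnerA y t
      (y :: p.1, p.2)
    else ([], y :: t)

theorem pvInnerA_snd_length (x : Int) (t : List Int) : (pvInnerA x t).2.length ≤ t.length := by
  induction t generalizing x with
  | nil => simp [pvInnerA]
  | cons y t ih =>
    simp only [pvInnerA]
    split
    · exact le_trans (ih y) (Nat.le_succ _)
    · simp

-- outer 'while' of A over the remaining eligible ranks, accumulating the in_run set
def pvOuterA : List Int → PySem.Set Int → PySem.Set Int
  | [], acc => acc
  | x :: t, acc =>
    let p := pvInnerA x t
    let grp := x :: p.1
    let acc' := if 3 ≤ grp.length then grp.foldl PySem.Set.add acc else acc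
    pvOuterA p.2 acc'
termination_by l => l.length
decreasing_by simpa using Nat.lt_succ_of_le (pvInnerA_snd_length x t)

def get_run_ranks (hand_ranks : List Int) : List Int :=
  let eligible := PySem.List.sorted (PySem.Set.ofList (hand_ranks.filter (fun r => r < 12))) (fun x => x) false
  pvOuterA eligible PySem.Set.empty

-- ===== PORT B =====
-- the three-window membership test of B
def pvWinB (p : PySem.Set Int) (r : Int) : Bool :=
  (PySem.Set.contains p (r - 2) && PySem.Set.contains p (r - 1)) ||
  (PySem.Set.contains p (r - 1) && PySem.Set.contains p (r + 1)) ||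
  (PySem.Set.contains p (r + 1) && PySem.Set.contains p (r + 2))

def get_run_ranks_alt (hand_ranks : List Int) : List Int :=
  let p : PySem.Set Int := PySem.Set.ofList (hand_ranks.filter (fun r => r < 12))
  -- set comprehension over sorted(p) with the window condition
  (PySem.List.sorted p (fun x => x) false).foldl
    (fun s r => if pvWinB p r then PySem.Set.add s r else s) PySem.Set.empty

-- ===== PRECONDITION & SPEC =====
def Spec_get_run_ranks (hand_ranks : List Int) (out : List Int) : Prop := out = get_run_ranks_alt hand_ranks
instance (hand_ranks : List Int) (out : List Int) : Decidable (Spec_get_run_ranks hand_ranks out) := by unfold Spec_get_run_ranks; infer_instance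

-- ===== CLAIM (what is proved, stated in full; the proofs are below) =====
def Claim_equal_get_run_ranks : Prop := ∀ (hand_ranks : List Int), Dom_get_run_ranks hand_ranks → Spec_get_run_ranks hand_ranks (get_run_ranks hand_ranks)

-- ===== LEMMAS AND PROOFS =====

-- the window condition expressed by membership in a list L
def pvWinL (L : List Int) (r : Int) : Bool :=
  (decide ((r - 2) ∈ L) && decide ((r - 1) ∈ L)) ||
  (decide ((r - 1) ∈ L) && decide ((r + 1) ∈ L)) ||
  (decide ((r + 1) ∈ L) && decide ((r + 2) ∈ L))

theorem pvWinB_eq_winL (p : PySem.Set Int) (r : Int) : pvWinB p r = pvWinL p r := by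
  simp [pvWinB, pvWinL, PySem.Set.contains, List.contains_eq_mem]

theorem pvWinL_congr (L M : List Int) (h : ∀ v : Int, v ∈ L ↔ v ∈ M) (r : Int) :
    pvWinL L r = pvWinL M r := by
  simp [pvWinL, h]

-- structure of A's inner loop: it splits t into run ++ rem
theorem pvInnerA_append (x : Int) (t : List Int) :
    (pvInnerA x t).1 ++ (pvInnerA x t).2 = t := by
  induction t generalizing x with
  | nil => simp [pvInnerA]
  | cons y t ih =>
    simp only [pvInnerA]
    split
    · simpa using ih y
    · simp

-- the group x :: run is exactly the integer interval [x, x + run.length]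
theorem pvInnerA_grp_mem (x : Int) (t : List Int) (v : Int) :
    v ∈ x :: (pvInnerA x t).1 ↔ x ≤ v ∧ v ≤ x + (pvInnerA x t).1.length := by
  induction t generalizing x with
  | nil => simp [pvInnerA]; omega
  | cons y t ih =>
    by_cases hy : y = x + 1
    · subst hy
      have h := ih (x + 1)
      simp only [pvInnerA, if_true, List.mem_cons] at h ⊢
      rw [show ((x + 1) :: (pvInnerA (x + 1) t).1).length = (pvInnerA (x + 1) t).1.length + 1 from rfl]
      push_cast
      constructor
      · rintro (rfl | hv)
        · omega
        · have := h.mp hv; omega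
      · intro hb
        by_cases hvx : v = x
        · exact Or.inl hvx
        · exact Or.inr (h.mpr (by omega))
    · simp [pvInnerA, if_neg hy]; omega

-- the first remaining element is not last-of-run + 1
theorem pvInnerA_head_ne (x : Int) (t : List Int) (z : Int) (w : List Int)
    (h : (pvInnerA x t).2 = z :: w) : z ≠ x + (pvInnerA x t).1.length + 1 := by
  induction t generalizing x with
  | nil => simp [pvInnerA] at h
  | cons y t ih =>
    by_cases hy : y = x + 1
    · subst hy
      simp only [pvInnerA] at h ⊢
      have := ih (x + 1) h
      intro hc; apply this
      simp at hc ⊢; omega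
    · simp only [pvInnerA, if_neg hy] at h ⊢
      cases h
      simpa using fun hc => hy (by omega)

-- a fold of Set.add over fresh, strictly increasing elements is plain append
theorem foldl_add_fresh (g : List Int) (acc : List Int)
    (hg : g.Pairwise (· < ·)) (hfresh : ∀ e ∈ g, e ∉ acc) :
    g.foldl PySem.Set.add acc = acc ++ g := by
  induction g generalizing acc with
  | nil => simp
  | cons e g ih =>
    simp only [List.foldl_cons]
    rw [PySem.Set.add_of_not_mem (hfresh e (by simp))]
    rw [ih (acc ++ [e]) (List.Pairwise.of_cons hg)
        (fun b hb hmem => by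
          rcases List.mem_append.mp hmem with h | h
          · exact hfresh b (by simp [hb]) h
          · simp at h; subst h
            exact absurd (List.rel_of_pairwise_cons hg hb) (lt_irrefl _))]
    simp

-- B's guarded fold of Set.add over fresh, strictly increasing elements is a filter
theorem foldl_add_if_fresh (xs : List Int) (c : Int → Bool) (acc : List Int)
    (hx : xs.Pairwise (· < ·)) (hfresh : ∀ e ∈ xs, e ∉ acc) :
    xs.foldl (fun s r => if c r then PySem.Set.add s r else s) acc = acc ++ xs.filter c := by
  induction xs generalizing acc with
  | nil => simp
  | cons e xs ih =>
    simp only [List.foldl_cons]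
    by_cases hc : c e
    · rw [if_pos hc, PySem.Set.add_of_not_mem (hfresh e (by simp))]
      rw [ih (acc ++ [e]) (List.Pairwise.of_cons hx)
          (fun b hb hmem => by
            rcases List.mem_append.mp hmem with h | h
            · exact hfresh b (by simp [hb]) h
            · simp at h; subst h
              exact absurd (List.rel_of_pairwise_cons hx hb) (lt_irrefl _))]
      simp [hc]
    · rw [if_neg hc]
      rw [ih acc (List.Pairwise.of_cons hx) (fun b hb => hfresh b (by simp [hb]))]
      simp [hc]

-- main invariant: A's outer loop appends exactly the window-qualified elements
theorem pvOuterA_eq (L : List Int) (acc : List Int)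
    (hL : L.Pairwise (· < ·)) (hacc : ∀ a ∈ acc, ∀ b ∈ L, a < b) :
    pvOuterA L acc = acc ++ L.filter (fun r => pvWinL L r) := by
  match L with
  | [] => simp [pvOuterA]
  | x :: t =>
    simp only [pvOuterA]
    set run := (pvInnerA x t).1 with hrun
    set rem := (pvInnerA x t).2 with hrem
    set m := run.length with hm
    have hsplit : (x :: run) ++ rem = x :: t := by
      simpa using pvInnerA_append x t
    have hgrp_mem : ∀ v : Int, v ∈ x :: run ↔ x ≤ v ∧ v ≤ x + m :=
      fun v => pvInnerA_grp_mem x t v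
    have hpw_split : ((x :: run) ++ rem).Pairwise (· < ·) := by rw [hsplit]; exact hL
    have hgrp_pw : (x :: run).Pairwise (· < ·) := hpw_split.sublist (List.sublist_append_left _ _)
    have hrem_pw : rem.Pairwise (· < ·) := hpw_split.sublist (List.sublist_append_right _ _)
    have hcross : ∀ a ∈ x :: run, ∀ b ∈ rem, a < b :=
      fun a ha b hb => (List.pairwise_append.mp hpw_split).2.2 a ha b hb
    have hrem_lb : ∀ b ∈ rem, x + m + 2 ≤ b := by
      intro b hb
      have h1 : x + m < b := hcross (x + m) ((hgrp_mem _).mpr (by omega)) b hb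
      match hr : rem with
      | [] => simp at hb
      | z :: w =>
        have hz : z ≠ x + m + 1 := pvInnerA_head_ne x t z w hr
        rcases List.mem_cons.mp hb with h | h
        · omega
        · have : z < b := List.rel_of_pairwise_cons (hr ▸ hrem_pw) h
          have hz1 : x + m < z := hcross (x + m) ((hgrp_mem _).mpr (by omega)) z (by simp)
          omega
    have hmemL : ∀ v : Int, v ∈ x :: t ↔ (x ≤ v ∧ v ≤ x + m) ∨ v ∈ rem := by
      intro v
      rw [← hsplit, List.mem_append, hgrp_mem]
    have hnot_next : (x + m + 1) ∉ x :: t := by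
      rw [hmemL]
      rintro (h | h)
      · omega
      · exact absurd (hrem_lb _ h) (by omega)
    -- membership above the group transfers from L to rem
    have htrans : ∀ v : Int, x + m + 1 ≤ v → (v ∈ x :: t ↔ v ∈ rem) := by
      intro v hv
      rw [hmemL]
      constructor
      · rintro (h | h)
        · omega
        · exact h
      · exact Or.inr
    -- the window condition for remaining elements only looks at rem
    have hwin_rem : ∀ r ∈ rem, pvWinL (x :: t) r = pvWinL rem r := by
      intro r hr
      have hrlb := hrem_lb r hr
      by_cases hcase : r = x + m + 2
      · -- r - 1 = x + m + 1 is in neither list; both window1 and window2 are false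
        have h1 : ¬ ((r - 1) ∈ x :: t) := by
          have he : r - 1 = x + m + 1 := by rw [hcase]; ring
          rw [he]; exact hnot_next
        have h2 : ¬ ((r - 1) ∈ rem) := fun h => absurd (hrem_lb _ h) (by omega)
        have h3 : ((r + 1) ∈ x :: t) ↔ ((r + 1) ∈ rem) := htrans _ (by omega)
        have h4 : ((r + 2) ∈ x :: t) ↔ ((r + 2) ∈ rem) := htrans _ (by omega)
        simp [pvWinL, h1, h2, h3, h4]
      · have h1 : ((r - 2) ∈ x :: t) ↔ ((r - 2) ∈ rem) := htrans _ (by omega)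
        have h2 : ((r - 1) ∈ x :: t) ↔ ((r - 1) ∈ rem) := htrans _ (by omega)
        have h3 : ((r + 1) ∈ x :: t) ↔ ((r + 1) ∈ rem) := htrans _ (by omega)
        have h4 : ((r + 2) ∈ x :: t) ↔ ((r + 2) ∈ rem) := htrans _ (by omega)
        simp [pvWinL, h1, h2, h3, h4]
    -- value of the window condition on group elements
    have hwin_grp : ∀ g ∈ x :: run, pvWinL (x :: t) g = (decide (3 ≤ m + 1)) := by
      intro g hg
      have hgb := (hgrp_mem g).mp hg
      have hin : ∀ v : Int, x ≤ v → v ≤ x + m → v ∈ x :: t := fun v h1 h2 => (hmemL v).mpr (Or.inl ⟨h1, h2⟩)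
      have hxm1 : ¬ ((x - 1) ∈ x :: t) := by
        rw [hmemL]
        rintro (h | h)
        · omega
        · exact absurd (hrem_lb _ h) (by omega)
      have hxm2 : ¬ ((x - 2) ∈ x :: t) := by
        rw [hmemL]
        rintro (h | h)
        · omega
        · exact absurd (hrem_lb _ h) (by omega)
      by_cases hm3 : 3 ≤ m + 1
      · rw [decide_eq_true hm3]
        simp only [pvWinL, Bool.or_eq_true, Bool.and_eq_true, decide_eq_true_iff]
        by_cases hga : x + 2 ≤ g
        · exact Or.inl (Or.inl ⟨hin _ (by omega) (by omega), hin _ (by omega) (by omega)⟩)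
        · by_cases hgb2 : g = x + 1
          · exact Or.inl (Or.inr ⟨hin _ (by omega) (by omega), hin _ (by omega) (by omega)⟩)
          · have : g = x := by omega
            exact Or.inr ⟨hin _ (by omega) (by omega), hin _ (by omega) (by omega)⟩
      · rw [decide_eq_false hm3]
        have hm' : m ≤ 1 := by omega
        have hnn : ¬ ((x + m + 1) ∈ x :: t) := hnot_next
        -- every window needs a value outside [x, x+m]: one of x-2, x-1, x+m+1
        have hout : ∀ v : Int, (v < x ∨ (x + m < v ∧ v < x + m + 2)) → ¬ (v ∈ x :: t) := by
          intro v hv hmemv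
          rcases (hmemL v).mp hmemv with h | h
          · omega
          · have := hrem_lb v h; omega
        simp only [pvWinL, Bool.or_eq_false_iff, Bool.and_eq_false_iff, decide_eq_false_iff_not]
        by_cases hg0 : g = x + m
        · refine ⟨⟨?_, ?_⟩, ?_⟩
          · by_cases hx0 : m = 0
            · exact Or.inr (hout (g - 1) (by omega))
            · exact Or.inl (hout (g - 2) (by omega))
          · exact Or.inr (hout (g + 1) (by omega))
          · exact Or.inl (hout (g + 1) (by omega))
        · -- g < x + m, so m = 1 and g = x
          refine ⟨⟨?_, ?_⟩, ?_⟩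
          · exact Or.inr (hout (g - 1) (by omega))
          · exact Or.inl (hout (g - 1) (by omega))
          · exact Or.inr (hout (g + 2) (by omega))
    -- put the pieces together
    have hacc_not : ∀ e ∈ x :: run, e ∉ acc := by
      intro e he hmem
      have : e < e := hacc e hmem e (by rw [← hsplit]; exact List.mem_append.mpr (Or.inl he))
      exact absurd this (lt_irrefl _)
    have hstep : (if 3 ≤ (x :: run).length then (x :: run).foldl PySem.Set.add acc else acc)
        = acc ++ (if 3 ≤ m + 1 then x :: run else []) := by
      simp only [List.length_cons, ← hm]
      split
      · exact foldl_add_fresh _ _ hgrp_pw hacc_not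
      · simp
    have hrec := pvOuterA_eq rem (acc ++ (if 3 ≤ m + 1 then x :: run else []))
        hrem_pw
        (by
          intro a ha b hb
          rcases List.mem_append.mp ha with h | h
          · exact hacc a h b (by rw [← hsplit]; exact List.mem_append.mpr (Or.inr hb))
          · have hg : a ∈ x :: run := by
              by_cases h3 : 3 ≤ m + 1
              · simpa [h3] using h
              · simp [h3] at h
            have := (hgrp_mem a).mp hg
            have := hrem_lb b hb
            omega)
    rw [hstep, hrec]
    have hfilter : (x :: t).filter (fun r => pvWinL (x :: t) r)
        = (if 3 ≤ m + 1 then x :: run else []) ++ rem.filter (fun r => pvWinL rem r) := by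
      conv_lhs => rw [← hsplit]
      rw [List.filter_append]
      congr 1
      · by_cases h3 : 3 ≤ m + 1
        · rw [if_pos h3]
          apply List.filter_eq_self.mpr
          intro a ha
          simp only [hsplit]
          rw [hwin_grp a ha]
          exact decide_eq_true h3
        · rw [if_neg h3]
          apply List.filter_eq_nil_iff.mpr
          intro a ha
          simp only [hsplit]
          rw [hwin_grp a ha]
          simp [h3]
      · simp only [hsplit]
        exact List.filter_congr hwin_rem
    rw [hfilter, List.append_assoc]
termination_by L.length
decreasing_by
  have := pvInnerA_snd_length x t
  simpa [hrem] using Nat.lt_succ_of_le this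

-- ===== VERDICT (by name: the statement is the Claim_ definition above) =====
theorem get_run_ranks_spec : Claim_equal_get_run_ranks := by
  intro hand_ranks _
  unfold Spec_get_run_ranks get_run_ranks get_run_ranks_alt
  set p : PySem.Set Int := PySem.Set.ofList (hand_ranks.filter (fun r => r < 12)) with hp
  set L := PySem.List.sorted p (fun x => x) false with hLdef
  have hL : L.Pairwise (· < ·) := PySem.List.sorted_ofList_pairwise_lt _
  have hmem : ∀ v : Int, v ∈ p ↔ v ∈ L :=
    fun v => (PySem.List.mem_sorted p (fun x => x) false v).symm
  rw [pvOuterA_eq L PySem.Set.empty hL (by intro a ha; simp [PySem.Set.empty] at ha)]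
  rw [foldl_add_if_fresh L _ PySem.Set.empty hL (by intro e _; simp [PySem.Set.empty])]
  congr 1
  apply List.filter_congr
  intro r _
  rw [pvWinB_eq_winL, pvWinL_congr p L hmem]
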